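-- pv_equiv track=rewrite | github.com/AmeerTabri/standards-atlas | visualization/Backend/parsing.py | generate_all_subsections
-- ===== SOURCE A (Python) =====
-- def generate_all_subsections(section):
--     subsections = [section + ".1"]
--     num_dots = section.count('.')
--
--     for i in range(num_dots):
--         last_dot = section.rfind('.')
--         section = section[:last_dot] + "." + str(int(section[last_dot+1:]) + 1)
--         subsections.append(section)
--         section = section.rsplit('.', 1)[0]
--     for i in range(1,8): # allow jumps
--         subsections.append(str(int(section) + i))
--
--     return subsections
-- ===== SOURCE B (Python) =====
-- def generate_all_subsections(section):
--     parts = section.split('.')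
--     out = [section + ".1"]
--     for k in reversed(range(2, len(parts) + 1)):
--         out.append('.'.join(parts[:k-1]) + '.' + str(int(parts[k-1]) + 1))
--     for i in range(1, 8):
--         out.append(str(int(parts[0]) + i))
--     return out
-- ===== Notes on version B (the rewrite author's own statement) =====
-- stated objective: alternative
-- what changed: B parses the section string once with split('.') and builds each subsection id by joining an unchanged prefix of the parts list and incrementing only the indexed last component, instead of A's per-iteration rfind/rsplit re-scanning of a string it mutates in place.
-- outside the precondition, e.g. on generate_all_subsections('.'): A raises ValueError, B raises ValueError
import Mathlib
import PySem

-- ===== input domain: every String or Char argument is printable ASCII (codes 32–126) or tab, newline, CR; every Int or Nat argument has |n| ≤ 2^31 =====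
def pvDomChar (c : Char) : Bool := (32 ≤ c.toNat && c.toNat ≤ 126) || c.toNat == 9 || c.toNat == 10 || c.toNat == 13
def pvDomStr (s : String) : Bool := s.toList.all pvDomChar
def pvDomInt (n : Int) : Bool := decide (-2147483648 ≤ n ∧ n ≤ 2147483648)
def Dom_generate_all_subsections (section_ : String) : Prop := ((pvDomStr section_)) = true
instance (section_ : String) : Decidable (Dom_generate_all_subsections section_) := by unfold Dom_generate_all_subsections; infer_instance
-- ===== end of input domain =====

-- B replaces A's repeated rfind/rsplit re-scanning of a mutated string by one split('.')
-- followed by indexed slicing over the parts list (objective: alternative decomposition, same cost).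


-- ===== PORT A =====
-- s.rsplit('.', 1)[0] : everything before the last '.', or s itself if there is no '.'
-- (hand port, exact for the one-character separator '.')
def pvRsplitDotHead (s : List Char) : List Char :=
  let r := PySem.Chars.rfind s ['.']
  if r = -1 then s else PySem.List.slice s none (some r)

-- one iteration of A's for-loop body: (next value of `section`, the string appended)
def pvAStep (sec : List Char) : List Char × List Char :=
  let ld := PySem.Chars.rfind sec ['.']
  let newsec := PySem.List.slice sec none (some ld) ++ ['.'] ++
      PySem.Int.toChars ((PySem.Int.ofChars? (PySem.List.slice sec (some (ld + 1)) none)).getD 0 + 1)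
  (pvRsplitDotHead newsec, newsec)

-- 'for i in range(num_dots)' as structural recursion on the remaining iteration count
def pvALoop : Nat → List Char → List (List Char) → List Char × List (List Char)
  | 0, sec, subs => (sec, subs)
  | n + 1, sec, subs => pvALoop n (pvAStep sec).1 (subs ++ [(pvAStep sec).2])

def generate_all_subsections (section_ : String) : List String :=
  let s := section_.toList
  let numDots := PySem.Chars.count s ['.']
  let st := pvALoop numDots s [s ++ ['.', '1']]
  (st.2 ++ (PySem.List.pyRange 1 8 1).map
      (fun i => PySem.Int.toChars ((PySem.Int.ofChars? st.1).getD 0 + i))).map String.ofList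


-- ===== PORT B =====
def generate_all_subsections_alt (section_ : String) : List String :=
  let s := section_.toList
  let parts := PySem.Chars.splitOn s ['.']
  let out := [s ++ ['.', '1']]
  let out := (PySem.List.pyRange 2 ((parts.length : Int) + 1) 1).reverse.foldl
    (fun acc k => acc ++
      [PySem.Chars.join ['.'] (PySem.List.slice parts none (some (k - 1))) ++ '.' ::
        PySem.Int.toChars ((PySem.Int.ofChars? (PySem.List.pyGetD parts (k - 1) [])).getD 0 + 1)]) out
  let out := (PySem.List.pyRange 1 8 1).foldl
    (fun acc i => acc ++
      [PySem.Int.toChars ((PySem.Int.ofChars? (PySem.List.pyGetD parts 0 [])).getD 0 + i)]) out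
  out.map String.ofList


-- ===== PRECONDITION & SPEC =====
-- Pre_: every '.'-separated component of the string parses as a Python int — exactly the
-- inputs on which A returns normally (on any other string one of A's int() calls raises ValueError).
def Pre_generate_all_subsections (section_ : String) : Prop :=
  ∀ p ∈ PySem.Chars.splitOn section_.toList ['.'], (PySem.Int.ofChars? p).isSome = true
instance (section_ : String) : Decidable (Pre_generate_all_subsections section_) := by
  unfold Pre_generate_all_subsections; infer_instance
def pvWitness_generate_all_subsections : String := "1.2.3"

def Spec_generate_all_subsections (section_ : String) (out : List String) : Prop := out = generate_all_subsections_alt section_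
instance (section_ : String) (out : List String) : Decidable (Spec_generate_all_subsections section_ out) := by unfold Spec_generate_all_subsections; infer_instance

-- ===== CLAIM (what is proved, stated in full; the proofs are below) =====
def Claim_equal_generate_all_subsections : Prop := ∀ (section_ : String), Dom_generate_all_subsections section_ → Pre_generate_all_subsections section_ → Spec_generate_all_subsections section_ (generate_all_subsections section_)

-- ===== LEMMAS AND PROOFS =====

theorem pv_singleton_isPrefixOf (c : Char) (l : List Char) :
    [c].isPrefixOf l = (l.head?.any (· == c)) := by
  cases l <;> simp [List.isPrefixOf, eq_comm]

theorem pv_splitOn_go (c : Char) :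
    ∀ (fuel : Nat) (l cur : List Char) (accs : List (List Char)), l.length ≤ fuel →
      PySem.Chars.splitOn.go [c] fuel l cur accs =
        accs.reverse ++ (List.splitOn c l).modifyHead (cur.reverse ++ ·) := by
  intro fuel
  induction fuel with
  | zero => intro l cur accs h
            have : l = [] := by cases l <;> simp_all
            subst this
            simp [PySem.Chars.splitOn.go, List.splitOn_nil]
  | succ n ih =>
    intro l cur accs h
    cases l with
    | nil => simp [PySem.Chars.splitOn.go, List.splitOn_nil]
    | cons ch rest =>
      rw [PySem.Chars.splitOn.go]
      simp only [pv_singleton_isPrefixOf, List.head?_cons, Option.any_some]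
      by_cases hc : ch = c
      · subst hc
        simp only [BEq.rfl, if_pos, List.length_cons, List.drop_succ_cons]
        simp only [List.length_nil, List.drop_zero]
        rw [ih rest [] _ (by simpa using h)]
        rw [show List.splitOn ch (ch :: rest) = [] :: List.splitOn ch rest by
          simp [List.splitOn, List.splitOnP_cons]]
        cases List.splitOn ch rest <;> simp
      · have : (ch == c) = false := by simp [hc]
        rw [this]
        simp only [if_false, Bool.false_eq_true]
        rw [ih rest (ch :: cur) accs (by simpa using h)]
        have hs : List.splitOn c (ch :: rest) = (List.splitOn c rest).modifyHead (ch :: ·) := by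
          simp [List.splitOn, List.splitOnP_cons, this]
        rw [hs, List.modifyHead_modifyHead]
        congr 1
        cases hsp : List.splitOn c rest with
        | nil => exact absurd hsp (List.splitOnP_ne_nil _ _)
        | cons a t => simp [Function.comp]

theorem pv_splitOn_eq (s : List Char) (c : Char) :
    PySem.Chars.splitOn s [c] = List.splitOn c s := by
  rw [PySem.Chars.splitOn, pv_splitOn_go c (s.length + 1) s [] [] (by omega)]
  cases hsp : List.splitOn c s with
  | nil => exact absurd hsp (List.splitOnP_ne_nil _ _)
  | cons a t => simp

theorem pv_count_go (c : Char) :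
    ∀ (fuel : Nat) (l : List Char) (acc : Nat), l.length ≤ fuel →
      PySem.Chars.count.go [c] fuel l acc = acc + l.count c := by
  intro fuel
  induction fuel with
  | zero => intro l acc h
            have : l = [] := by cases l <;> simp_all
            subst this; simp [PySem.Chars.count.go]
  | succ n ih =>
    intro l acc h
    cases l with
    | nil => simp [PySem.Chars.count.go]
    | cons ch rest =>
      rw [PySem.Chars.count.go]
      simp only [pv_singleton_isPrefixOf, List.head?_cons, Option.any_some]
      by_cases hc : ch = c
      · subst hc
        simp only [BEq.rfl, if_pos, List.length_cons, List.drop_succ_cons, List.length_nil,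
          List.drop_zero]
        rw [ih rest (acc + 1) (by simpa using h)]
        simp
        omega
      · have hne : (ch == c) = false := by simp [hc]
        rw [hne]
        simp only [if_false, Bool.false_eq_true]
        rw [ih rest acc (by simpa using h)]
        simp [List.count_cons, hne]

theorem pv_count_eq (s : List Char) (c : Char) :
    PySem.Chars.count s [c] = s.count c := by
  rw [PySem.Chars.count]
  simp only [List.isEmpty_cons, if_false, Bool.false_eq_true]
  rw [pv_count_go c s.length s 0 (le_refl _)]
  simp

theorem pv_length_splitOn (s : List Char) (c : Char) :
    (List.splitOn c s).length = s.count c + 1 := by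
  induction s with
  | nil => simp [List.splitOn_nil]
  | cons ch rest ih =>
    by_cases hc : ch = c
    · subst hc
      simp [List.splitOn, List.splitOnP_cons] at *
      omega
    · have hne : (ch == c) = false := by simp [hc]
      simp [List.splitOn, List.splitOnP_cons, hne, List.length_modifyHead, List.count_cons] at *
      omega

theorem pv_splitOn_ne_nil (s : List Char) (c : Char) : List.splitOn c s ≠ [] :=
  List.splitOnP_ne_nil _ _

theorem pv_not_mem_of_mem_splitOn (s : List Char) (c : Char) :
    ∀ p ∈ List.splitOn c s, c ∉ p := by
  induction s with
  | nil => intro p hp; simp [List.splitOn_nil] at hp; subst hp; simp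
  | cons ch rest ih =>
    intro p hp
    by_cases hc : ch = c
    · subst hc
      rw [show List.splitOn ch (ch :: rest) = [] :: List.splitOn ch rest by
        simp [List.splitOn, List.splitOnP_cons]] at hp
      rcases List.mem_cons.mp hp with h | h
      · subst h; simp
      · exact ih p h
    · have hne : (ch == c) = false := by simp [hc]
      rw [show List.splitOn c (ch :: rest) = (List.splitOn c rest).modifyHead (ch :: ·) by
        simp [List.splitOn, List.splitOnP_cons, hne]] at hp
      cases hsp : List.splitOn c rest with
      | nil => exact absurd hsp (List.splitOnP_ne_nil _ _)
      | cons a t =>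
        rw [hsp] at hp
        simp only [List.modifyHead] at hp
        rcases List.mem_cons.mp hp with h | h
        · subst h
          intro hmem
          rcases List.mem_cons.mp hmem with h2 | h2
          · exact hc h2.symm
          · exact ih a (by rw [hsp]; exact List.mem_cons_self) h2
        · exact ih p (by rw [hsp]; exact List.mem_cons_of_mem _ h)

theorem pv_join_append_singleton (c : Char) (qs : List (List Char)) (p : List Char) (h : qs ≠ []) :
    PySem.Chars.join [c] (qs ++ [p]) = PySem.Chars.join [c] qs ++ c :: p := by
  induction qs with
  | nil => exact absurd rfl h
  | cons q qs' ih =>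
    cases qs' with
    | nil => simp [PySem.Chars.join_cons_cons, PySem.Chars.join_singleton]
    | cons q2 rest =>
      have e1 : (q :: q2 :: rest) ++ [p] = q :: (q2 :: (rest ++ [p])) := by simp
      rw [e1, PySem.Chars.join_cons_cons,
        show q2 :: (rest ++ [p]) = (q2 :: rest) ++ [p] from rfl, ih (by simp),
        PySem.Chars.join_cons_cons]
      simp

theorem pv_dot_not_mem_toChars (n : Int) : '.' ∉ PySem.Int.toChars n := by
  rw [PySem.Int.toChars]
  split
  · intro h
    rcases List.mem_cons.mp h with h' | h'
    · exact absurd h' (by decide)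
    · exact absurd (Nat.isDigit_of_mem_toDigits (by norm_num) (by norm_num) h') (by decide)
  · intro h
    exact absurd (Nat.isDigit_of_mem_toDigits (by norm_num) (by norm_num) h) (by decide)

theorem pv_rfind_go (s : List Char) (c : Char) (k : Nat)
    (hk1 : [c].isPrefixOf (s.drop k) = true)
    (hk2 : ∀ i : Nat, k < i → [c].isPrefixOf (s.drop i) = false) :
    ∀ j : Nat, k ≤ j → PySem.Chars.rfind.go s [c] j = (k : Int) := by
  intro j
  induction j with
  | zero => intro h
            have : k = 0 := by omega
            subst this
            rw [PySem.Chars.rfind.go]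
            simp only [List.drop_zero] at hk1
            simp [hk1]
  | succ m ih =>
    intro h
    rw [PySem.Chars.rfind.go]
    by_cases hk : k = m + 1
    · subst hk
      simp [hk1]
    · rw [hk2 (m + 1) (by omega)]
      simp only [if_false, Bool.false_eq_true]
      exact ih (by omega)

theorem pv_rfind_append (a b : List Char) (c : Char) (hb : c ∉ b) :
    PySem.Chars.rfind (a ++ c :: b) [c] = (a.length : Int) := by
  rw [PySem.Chars.rfind]
  apply pv_rfind_go
  · rw [List.drop_left]
    simp [List.isPrefixOf]
  · intro i hi
    rw [pv_singleton_isPrefixOf, List.head?_drop]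
    rw [List.getElem?_append_right (by omega)]
    rw [show i - a.length = (i - a.length - 1) + 1 by omega, List.getElem?_cons_succ]
    cases hgb : b[i - a.length - 1]? with
    | none => simp
    | some x =>
      have hx : x ∈ b := List.mem_of_getElem? hgb
      simp only [Option.any_some]
      have : (x == c) = false := by
        simp only [beq_eq_false_iff_ne, ne_eq]
        intro hxc
        exact hb (hxc ▸ hx)
      exact this
  · simp only [List.length_append, List.length_cons]; omega


-- the list B's first loop produces, as a function of the '.'-separated parts
def pvTail (ps : List (List Char)) : List (List Char) :=
  (PySem.List.pyRange 2 ((ps.length : Int) + 1) 1).reverse.map (fun k =>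
    PySem.Chars.join ['.'] (PySem.List.slice ps none (some (k - 1))) ++ '.' ::
      PySem.Int.toChars ((PySem.Int.ofChars? (PySem.List.pyGetD ps (k - 1) [])).getD 0 + 1))


theorem pv_step (qs : List (List Char)) (p : List Char) (hq : qs ≠ []) (hp : '.' ∉ p) :
    pvAStep (PySem.Chars.join ['.'] (qs ++ [p])) =
      (PySem.Chars.join ['.'] qs,
       PySem.Chars.join ['.'] qs ++ '.' :: PySem.Int.toChars ((PySem.Int.ofChars? p).getD 0 + 1)) := by
  rw [pv_join_append_singleton _ _ _ hq]
  simp only [pvAStep, pvRsplitDotHead]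
  rw [pv_rfind_append _ _ _ hp]
  rw [PySem.List.slice_to_natCast, List.take_left]
  rw [show ((PySem.Chars.join ['.'] qs).length : Int) + 1 = (((PySem.Chars.join ['.'] qs).length + 1 : Nat) : Int) by push_cast; ring]
  rw [PySem.List.slice_from_natCast]
  rw [show PySem.Chars.join ['.'] qs ++ '.' :: p = (PySem.Chars.join ['.'] qs ++ ['.']) ++ p by simp]
  rw [List.drop_left' (by simp)]
  rw [show PySem.Chars.join ['.'] qs ++ ['.'] ++
        PySem.Int.toChars ((PySem.Int.ofChars? p).getD 0 + 1) =
      PySem.Chars.join ['.'] qs ++ '.' ::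
        PySem.Int.toChars ((PySem.Int.ofChars? p).getD 0 + 1) by simp]
  rw [pv_rfind_append _ _ _ (pv_dot_not_mem_toChars _)]
  rw [if_neg (by omega)]
  rw [PySem.List.slice_to_natCast, List.take_left]

theorem pv_tail_append (qs : List (List Char)) (p : List Char) (hq : qs ≠ []) :
    pvTail (qs ++ [p]) =
      (PySem.Chars.join ['.'] qs ++ '.' :: PySem.Int.toChars ((PySem.Int.ofChars? p).getD 0 + 1)) ::
        pvTail qs := by
  unfold pvTail
  have hq1 : 0 < qs.length := List.length_pos_iff.mpr hq
  have hlen : (((qs ++ [p]).length : Int) + 1) = ((qs.length : Int) + 1) + 1 := by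
    simp
  rw [hlen, PySem.List.pyRange_one_succ_right (by omega)]
  rw [List.reverse_append, List.reverse_singleton, List.singleton_append, List.map_cons]
  congr 1
  · have h1 : (qs.length : Int) + 1 - 1 = (qs.length : Int) := by ring
    rw [h1, PySem.List.slice_to_natCast, List.take_left, PySem.List.pyGetD_natCast]
    rw [List.getD_eq_getElem?_getD, List.getElem?_append_right (le_refl _)]
    simp
  · apply List.map_congr_left
    intro k hk
    rw [List.mem_reverse, PySem.List.mem_pyRange_one] at hk
    obtain ⟨hk2, hkm⟩ := hk
    obtain ⟨j, rfl, hj2, hjm⟩ :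
        ∃ j : Nat, k = (j : Int) ∧ 2 ≤ j ∧ j ≤ qs.length := ⟨k.toNat, by omega, by omega, by omega⟩
    have h1 : (j : Int) - 1 = ((j - 1 : Nat) : Int) := by omega
    rw [h1, PySem.List.slice_to_natCast, PySem.List.slice_to_natCast,
      List.take_append_of_le_length (by omega),
      PySem.List.pyGetD_natCast, PySem.List.pyGetD_natCast,
      List.getD_append _ _ _ _ (by omega)]

theorem pv_loop : ∀ (ps : List (List Char)), (∀ p ∈ ps, '.' ∉ p) → ps ≠ [] →
    ∀ subs, pvALoop (ps.length - 1) (PySem.Chars.join ['.'] ps) subs =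
      (ps.headD [], subs ++ pvTail ps) := by
  intro ps
  induction ps using List.reverseRecOn with
  | nil => intro _ h; exact absurd rfl h
  | append_singleton qs p ih =>
    intro hdf _ subs
    rcases hqs : qs with _ | ⟨q, qs'⟩
    · subst hqs
      simp only [List.nil_append, List.length_cons, List.length_nil, Nat.sub_self]
      show (_, _) = _
      unfold pvTail
      simp only [PySem.Chars.join_singleton, List.headD_cons, List.length_cons, List.length_nil]
      rw [show (((0 + 1 : Nat) : Int) + 1) = 2 by norm_num, show PySem.List.pyRange 2 2 = [] by decide]
      simp
    · subst hqs
      have hq : q :: qs' ≠ [] := by simp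
      have hlen : ((q :: qs') ++ [p]).length - 1 = ((q :: qs').length - 1) + 1 := by simp
      rw [hlen]
      show pvALoop _ (pvAStep _).1 (subs ++ [(pvAStep _).2]) = _
      rw [pv_step _ p hq (hdf p (by simp))]
      rw [ih (fun x hx => hdf x (by rcases List.mem_cons.mp hx with h | h <;> simp [h])) hq]
      rw [pv_tail_append _ p hq]
      simp


theorem pv_main (s : String) : generate_all_subsections s = generate_all_subsections_alt s := by
  simp only [generate_all_subsections, generate_all_subsections_alt]
  rw [pv_splitOn_eq]
  rw [PySem.List.foldl_append_singleton_eq_map, PySem.List.foldl_append_singleton_eq_map]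
  have hjoin : PySem.Chars.join ['.'] (List.splitOn '.' s.toList) = s.toList :=
    List.intercalate_splitOn s.toList '.'
  have hcount : PySem.Chars.count s.toList ['.'] = (List.splitOn '.' s.toList).length - 1 := by
    rw [pv_count_eq]
    have := pv_length_splitOn s.toList '.'
    omega
  rw [hcount]
  rw [show pvALoop ((List.splitOn '.' s.toList).length - 1) s.toList [s.toList ++ ['.', '1']] =
      pvALoop ((List.splitOn '.' s.toList).length - 1)
        (PySem.Chars.join ['.'] (List.splitOn '.' s.toList)) [s.toList ++ ['.', '1']] by
    rw [hjoin]]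
  rw [pv_loop _ (pv_not_mem_of_mem_splitOn s.toList '.') (pv_splitOn_ne_nil s.toList '.')]
  have hhead : PySem.List.pyGetD (List.splitOn '.' s.toList) 0 [] =
      (List.splitOn '.' s.toList).headD [] := by
    cases hsp : List.splitOn '.' s.toList with
    | nil => exact absurd hsp (pv_splitOn_ne_nil s.toList '.')
    | cons a t => simp [PySem.List.pyGetD]
  rw [hhead]
  simp [pvTail]

-- ===== VERDICT (by name: the statement is the Claim_ definition above) =====
theorem generate_all_subsections_spec : Claim_equal_generate_all_subsections := by
  intro section_ _ _
  exact pv_main section_
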